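-- pv_equiv track=rewrite | github.com/Arefay97/Social-Media-Analytics---Project | Louvain_algo.py | remove_empty
-- ===== SOURCE A (Python) =====
-- def remove_empty(com):
--     new_com = {}
--     new_com_inv = {}
--     index = 0
--     for old_index, nodes in com.items():
--         if len(nodes)>0:
--             new_com[index] = nodes
--             for node in nodes:
--                 new_com_inv[node] = index
--             index+=1
--     return(new_com,new_com_inv)
-- ===== SOURCE B (Python) =====
-- def remove_empty(com):
--     vals = list(com.values())
--     prefix = [0]
--     for v in vals:
--         prefix.append(prefix[-1] + (1 if len(v) > 0 else 0))
--     new_com = {prefix[k]: v for k, v in enumerate(vals) if len(v) > 0}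
--     new_com_inv = {node: prefix[k] for k, v in enumerate(vals) for node in v}
--     return (new_com, new_com_inv)
-- ===== Notes on version B (the rewrite author's own statement) =====
-- stated objective: alternative
-- what changed: A fuses everything into one loop that threads a mutable counter and fills both dicts as it goes; B first computes a prefix-count table (prefix[k] = number of non-empty communities before position k) by a scan, then builds new_com and new_com_inv in two independent passes that obtain each index by a closed-form table lookup instead of a running counter.
import Mathlib
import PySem

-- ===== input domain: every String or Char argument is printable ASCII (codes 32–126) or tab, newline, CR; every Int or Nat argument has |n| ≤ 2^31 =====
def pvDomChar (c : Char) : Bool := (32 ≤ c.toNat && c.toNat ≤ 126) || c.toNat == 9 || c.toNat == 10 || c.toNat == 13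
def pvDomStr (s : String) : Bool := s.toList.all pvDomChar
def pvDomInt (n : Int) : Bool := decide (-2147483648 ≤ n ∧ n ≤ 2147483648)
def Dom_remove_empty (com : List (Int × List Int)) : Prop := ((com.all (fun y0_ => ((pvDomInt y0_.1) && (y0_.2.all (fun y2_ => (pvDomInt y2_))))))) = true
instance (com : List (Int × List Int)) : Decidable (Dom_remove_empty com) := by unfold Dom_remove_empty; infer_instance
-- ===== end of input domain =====

-- B replaces A's fused loop (mutable counter, both dicts filled in one pass) by a scan that
-- precomputes a prefix-count table and two independent passes that look each index up in it.

-- ===== PORT A =====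
-- one loop step of A over an item (old_index, nodes); state is (new_com, new_com_inv, index)
def stepA (st : List (Int × List Int) × PySem.Dict Int Int × Int) (p : Int × List Int) :
    List (Int × List Int) × PySem.Dict Int Int × Int :=
  if p.2.length > 0 then
    (st.1 ++ [(st.2.2, p.2)],
     p.2.foldl (fun d node => d.insert node st.2.2) st.2.1,
     st.2.2 + 1)
  else st

def remove_empty (com : List (Int × List Int)) : (List (Int × List Int)) × (List (Int × Int)) :=
  let s := com.foldl stepA ([], PySem.Dict.empty, 0)
  (s.1, s.2.1.items)

-- ===== PORT B =====
-- the prefix loop: prefix = [0]; for v in vals: prefix.append(prefix[-1] + (1 if len(v) > 0 else 0))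
def preOf (vals : List (List Int)) : List Int :=
  vals.foldl (fun acc v => acc ++ [PySem.List.pyGetD acc (-1) 0 + (if v.length > 0 then (1:Int) else 0)]) [0]

def comStepB (pre : List Int) (acc : List (Int × List Int)) (p : Int × List Int) :
    List (Int × List Int) :=
  if p.2.length > 0 then acc ++ [(PySem.List.pyGetD pre p.1 0, p.2)] else acc

def invStepB (pre : List Int) (d : PySem.Dict Int Int) (p : Int × List Int) :
    PySem.Dict Int Int :=
  p.2.foldl (fun d node => d.insert node (PySem.List.pyGetD pre p.1 0)) d

def remove_empty_alt (com : List (Int × List Int)) : (List (Int × List Int)) × (List (Int × Int)) :=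
  let vals := com.map (fun p => p.2)
  let pre := preOf vals
  let new_com := (PySem.List.enumerate vals 0).foldl (comStepB pre) []
  let new_com_inv := (PySem.List.enumerate vals 0).foldl (invStepB pre) PySem.Dict.empty
  (new_com, new_com_inv.items)

-- ===== PRECONDITION & SPEC =====
def Spec_remove_empty (com : List (Int × List Int)) (out : (List (Int × List Int)) × (List (Int × Int))) : Prop := out = remove_empty_alt com
instance (com : List (Int × List Int)) (out : (List (Int × List Int)) × (List (Int × Int))) : Decidable (Spec_remove_empty com out) := by unfold Spec_remove_empty; infer_instance

-- ===== CLAIM (what is proved, stated in full; the proofs are below) =====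
def Claim_equal_remove_empty : Prop := ∀ (com : List (Int × List Int)), Dom_remove_empty com → Spec_remove_empty com (remove_empty com)

-- ===== LEMMAS AND PROOFS =====

-- number of non-empty communities in a list of node lists
def cnt (l : List (List Int)) : Int := (l.countP (fun v => v.length > 0) : Nat)

theorem cnt_nil : cnt [] = 0 := rfl

theorem cnt_append_singleton (w : List (List Int)) (v : List Int) :
    cnt (w ++ [v]) = cnt w + (if v.length > 0 then 1 else 0) := by
  simp [cnt, List.countP_append, List.countP_cons]

theorem pyGetD_append_neg_one (acc : List Int) (x : Int) :
    PySem.List.pyGetD (acc ++ [x]) (-1) 0 = x := by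
  simp [PySem.List.pyGetD, PySem.List.pyGet?, PySem.List.pyIdx?]

-- characterization of the prefix table: entry k is cnt (vals.take k)
theorem preOf_fold (u : List (List Int)) :
    ∀ (acc : List Int) (x : Int),
      u.foldl (fun acc v => acc ++ [PySem.List.pyGetD acc (-1) 0 + (if v.length > 0 then (1:Int) else 0)]) (acc ++ [x])
        = acc ++ [x] ++ (List.range u.length).map (fun k => x + cnt (u.take (k+1))) := by
  induction u with
  | nil => simp
  | cons v t ih =>
    intro acc x
    simp only [List.foldl_cons, pyGetD_append_neg_one]
    rw [ih (acc ++ [x]) (x + (if v.length > 0 then (1:Int) else 0))]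
    simp only [List.length_cons, List.range_succ_eq_map, List.map_cons, List.map_map]
    simp only [List.append_assoc, List.cons_append, List.nil_append]
    by_cases hb : v.length > 0 <;>
      simp only [cnt, List.take_succ_cons, List.take_zero, List.countP_cons, List.countP_nil,
        hb, decide_true, decide_false, if_true, if_false]
    all_goals
      refine congrArg (fun l => acc ++ l) ?_
      simp only [List.cons.injEq, List.map_inj_left, Function.comp, true_and]
      refine ⟨by push_cast; ring, fun a _ => by push_cast; ring⟩

theorem preOf_eq (vals : List (List Int)) :
    preOf vals = (List.range (vals.length + 1)).map (fun k => cnt (vals.take k)) := by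
  have h := preOf_fold vals [] 0
  simp only [List.nil_append] at h
  unfold preOf
  rw [h]
  rw [List.range_succ_eq_map, List.map_cons, List.map_map]
  simp only [List.take_zero, cnt_nil, List.cons_append, List.nil_append]
  congr 1
  apply List.map_congr_left
  intro k _
  simp [Function.comp]

theorem pre_lookup (vals : List (List Int)) (k : Nat) (hk : k < vals.length + 1) :
    PySem.List.pyGetD (preOf vals) ((k : Nat) : Int) 0 = cnt (vals.take k) := by
  rw [preOf_eq, PySem.List.pyGetD_natCast]
  rw [List.getD_eq_getElem?_getD]
  simp [hk]

-- the main invariant: A's fused loop over a suffix agrees with B's two table-lookup folds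
theorem main_inv (u : List (Int × List Int)) :
    ∀ (w : List (List Int)) (vals : List (List Int)) (Lc : List (Int × List Int)) (d : PySem.Dict Int Int),
      vals = w ++ u.map (fun p => p.2) →
      u.foldl stepA (Lc, d, cnt w)
        = ((PySem.List.enumerate u ((w.length : Nat) : Int)).foldl
              (fun acc p => comStepB (preOf vals) acc ((p.1, p.2.2) : Int × List Int)) Lc,
           (PySem.List.enumerate u ((w.length : Nat) : Int)).foldl
              (fun dd p => invStepB (preOf vals) dd ((p.1, p.2.2) : Int × List Int)) d,
           cnt w + cnt (u.map (fun p => p.2))) := by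
  induction u with
  | nil => intro w vals Lc d _; simp [PySem.List.enumerate_nil, cnt_nil]
  | cons q t ih =>
    intro w vals Lc d hv
    have hwlt : w.length < vals.length + 1 := by
      subst hv; simp
    have htake : vals.take w.length = w := by
      subst hv; simp
    have hlook : PySem.List.pyGetD (preOf vals) ((w.length : Nat) : Int) 0 = cnt w := by
      rw [pre_lookup vals w.length hwlt, htake]
    simp only [List.foldl_cons, PySem.List.enumerate_cons]
    have hv' : vals = (w ++ [q.2]) ++ t.map (fun p => p.2) := by
      subst hv; simp
    by_cases h : q.2.length > 0
    · have hst : stepA (Lc, d, cnt w) q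
          = (Lc ++ [(cnt w, q.2)], q.2.foldl (fun d node => d.insert node (cnt w)) d, cnt w + 1) := by
        simp [stepA, h]
      rw [hst]
      have hcnt : cnt (w ++ [q.2]) = cnt w + 1 := by
        rw [cnt_append_singleton]; simp [h]
      have := ih (w ++ [q.2]) vals (Lc ++ [(cnt w, q.2)])
        (q.2.foldl (fun d node => d.insert node (cnt w)) d) hv'
      rw [hcnt] at this
      rw [this]
      have hlen : ((((w ++ [q.2]).length : Nat)) : Int) = ((w.length : Nat) : Int) + 1 := by
        simp
      rw [hlen]
      simp only [Prod.mk.injEq]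
      refine ⟨?_, ?_, ?_⟩
      · congr 1
        simp [comStepB, h, hlook]
      · congr 1
        simp [invStepB, hlook]
      · simp [cnt, h]
        ring
    · have hq : q.2 = [] := by
        cases hq2 : q.2 <;> simp_all
      have hst : stepA (Lc, d, cnt w) q = (Lc, d, cnt w) := by
        simp [stepA, h]
      rw [hst]
      have hcnt : cnt (w ++ [q.2]) = cnt w := by
        rw [cnt_append_singleton]; simp [h]
      have := ih (w ++ [q.2]) vals Lc d hv'
      rw [hcnt] at this
      rw [this]
      have hlen : ((((w ++ [q.2]).length : Nat)) : Int) = ((w.length : Nat) : Int) + 1 := by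
        simp
      rw [hlen]
      simp only [Prod.mk.injEq]
      refine ⟨?_, ?_, ?_⟩
      · congr 1
        simp [comStepB, h]
      · congr 1
        simp [invStepB, hq]
      · simp [cnt, h]

theorem enumerate_map_snd (u : List (Int × List Int)) :
    ∀ (s : Int), PySem.List.enumerate (u.map (fun p => p.2)) s
      = (PySem.List.enumerate u s).map (fun p => (p.1, p.2.2)) := by
  induction u with
  | nil => intro s; simp [PySem.List.enumerate_nil]
  | cons q t ih => intro s; simp [PySem.List.enumerate_cons, ih]

-- ===== VERDICT (by name: the statement is the Claim_ definition above) =====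
theorem remove_empty_spec : Claim_equal_remove_empty := by
  intro com _
  show _ = _
  have h := main_inv com [] (com.map (fun p => p.2)) [] PySem.Dict.empty (by simp)
  rw [cnt_nil] at h
  simp only [remove_empty, remove_empty_alt]
  rw [h]
  simp only [enumerate_map_snd, List.foldl_map]
  rfl
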